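-- pv_equiv track=rewrite | github.com/mattwalters/buyitforlifescore | app/pipeline/src/pipeline/utils/tree.py | chunk_branches
-- ===== SOURCE A (Python) =====
-- def _walk_branch(comment: dict, tree: dict[str, list[dict]]) -> list[dict]:
--     """
--     Depth-first walk starting from `comment`, returning a flat ordered list
--     where every parent immediately precedes its children.
--     """
--     result = [comment]
--     comment_key = f"t1_{comment.get('id', '')}"
--     for child in tree.get(comment_key, []):
--         result.extend(_walk_branch(child, tree))
--     return result
--
-- def chunk_branches(tree: dict[str, list[dict]], max_chunk_size: int = 20) -> list[list[dict]]:
--     """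
--     Walks the comment tree depth-first and packs complete conversational branches
--     into chunks of approximately `max_chunk_size` comments.
--
--     Rules:
--       1. A branch is never split. If adding a branch would exceed max_chunk_size
--          AND the current bucket is non-empty, the bucket is sealed first.
--       2. A single branch that exceeds max_chunk_size is shipped as its own
--          oversized chunk (we never cut a conversation mid-thread).
--       3. Multiple small branches are packed together until the limit is reached.
--
--     Args:
--         tree: The adjacency list from build_comment_tree().
--         max_chunk_size: Soft maximum number of comments per chunk.
--
--     Returns:
--         A list of chunks, where each chunk is a list of comment dicts in
--         depth-first order with full branch locality preserved.
--     """
--     roots = tree.get("__roots__", [])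
--     chunks: list[list[dict]] = []
--     current_bucket: list[dict] = []
--
--     for root_comment in roots:
--         branch = _walk_branch(root_comment, tree)
--
--         # If adding this branch would overflow AND the bucket isn't empty, seal it.
--         if current_bucket and (len(current_bucket) + len(branch) > max_chunk_size):
--             chunks.append(current_bucket)
--             current_bucket = []
--
--         current_bucket.extend(branch)
--
--     # Flush any remaining comments.
--     if current_bucket:
--         chunks.append(current_bucket)
--
--     return chunks
-- ===== SOURCE B (Python) =====
-- def chunk_branches(tree: dict[str, list[dict]], max_chunk_size: int = 20) -> list[list[dict]]:
--     """Iterative re-implementation: explicit-stack DFS per root (children pushed in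
--     reverse for left-to-right order), branches collected first, then greedily packed."""
--     branches = []
--     for root in tree.get("__roots__", []):
--         branch = []
--         stack = [root]
--         while stack:
--             node = stack.pop()
--             branch.append(node)
--             stack.extend(reversed(tree.get(f"t1_{node.get('id', '')}", [])))
--         branches.append(branch)
--
--     chunks: list[list[dict]] = []
--     bucket: list[dict] = []
--     for branch in branches:
--         if bucket and len(bucket) + len(branch) > max_chunk_size:
--             chunks.append(bucket)
--             bucket = []
--         bucket.extend(branch)
--     return chunks + [bucket] if bucket else chunks
-- ===== Notes on version B (the rewrite author's own statement) =====
-- stated objective: alternative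
-- what changed: The recursive depth-first branch walk is replaced by an iterative explicit-stack traversal (children pushed in reverse for left-to-right order), and all branches are collected first and then greedily packed in a separate pass.
import Mathlib
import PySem

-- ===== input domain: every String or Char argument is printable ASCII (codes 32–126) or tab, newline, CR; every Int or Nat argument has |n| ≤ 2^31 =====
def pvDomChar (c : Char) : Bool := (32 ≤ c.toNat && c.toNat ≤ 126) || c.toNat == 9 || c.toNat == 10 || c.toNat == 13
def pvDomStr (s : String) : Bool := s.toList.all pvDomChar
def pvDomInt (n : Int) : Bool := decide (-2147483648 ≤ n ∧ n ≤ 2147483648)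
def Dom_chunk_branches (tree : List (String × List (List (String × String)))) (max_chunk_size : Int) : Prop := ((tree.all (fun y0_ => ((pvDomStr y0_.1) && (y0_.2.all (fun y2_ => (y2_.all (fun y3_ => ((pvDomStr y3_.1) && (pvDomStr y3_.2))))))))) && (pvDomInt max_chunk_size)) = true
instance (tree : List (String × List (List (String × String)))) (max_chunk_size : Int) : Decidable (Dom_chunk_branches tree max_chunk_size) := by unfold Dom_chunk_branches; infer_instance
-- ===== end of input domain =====

-- B replaces A's recursive depth-first walk by an explicit-stack iterative traversal and
-- packs the pre-collected branches in a separate pass (alternative decomposition, same cost).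

-- ===== PORT A =====
-- _walk_branch, with a fuel argument as totality device only: on inputs admitted by
-- Pre_chunk_branches (acyclic reachable child graph) the fuel tree.length+1 is never exhausted.
def walkBranch (tree : List (String × List (List (String × String)))) :
    Nat → List (String × String) → List (List (String × String))
  | 0, c => [c]
  | fuel+1, c =>
      (PySem.Dict.getD (PySem.Dict.mk tree)
          ("t1_" ++ PySem.Dict.getD (PySem.Dict.mk c) "id" "") []).foldl
        (fun res child => res ++ walkBranch tree fuel child) [c]

def chunk_branches (tree : List (String × List (List (String × String)))) (max_chunk_size : Int) :
    List (List (List (String × String))) :=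
  let roots := PySem.Dict.getD (PySem.Dict.mk tree) "__roots__" []
  let st := roots.foldl
    (fun (p : List (List (List (String × String))) × List (List (String × String))) root =>
      let branch := walkBranch tree (tree.length + 1) root
      let p := if p.2 ≠ [] ∧ ((p.2.length : Int) + (branch.length : Int) > max_chunk_size)
               then (p.1 ++ [p.2], []) else p
      (p.1, p.2 ++ branch)) ([], [])
  if st.2 ≠ [] then st.1 ++ [st.2] else st.1

-- ===== PORT B =====
-- bound on the number of children any lookup can return (for the termination measure)
def maxChild (tree : List (String × List (List (String × String)))) : Nat :=
  tree.foldr (fun p m => Nat.max p.2.length m) 0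

theorem len_getD_le (tree : List (String × List (List (String × String)))) (k : String) :
    (PySem.Dict.getD (PySem.Dict.mk tree) k []).length ≤ maxChild tree := by
  induction tree with
  | nil => simp [PySem.Dict.getD, PySem.Dict.get?, maxChild]
  | cons p rest ih =>
      have hm : maxChild (p :: rest) = Nat.max p.2.length (maxChild rest) := rfl
      simp only [PySem.Dict.getD_eq_get?_getD] at ih ⊢
      rw [PySem.Dict.get?_mk_cons]
      by_cases h : (p.1 == k) = true
      · simp [h, hm]
        try omega
      · simp [h, hm]
        omega

-- the Python 'while stack:' loop; the stack is a Lean list with its head as the top, so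
-- 'stack.extend(reversed(children))' followed by pops in child order is 'children ++ rest'.
-- Each stack entry carries a depth budget (fuel) as totality device only.
def stackWalk (tree : List (String × List (List (String × String)))) :
    List (Nat × List (String × String)) → List (List (String × String)) → List (List (String × String))
  | [], branch => branch
  | (d, node) :: rest, branch =>
      let children := PySem.Dict.getD (PySem.Dict.mk tree)
          ("t1_" ++ PySem.Dict.getD (PySem.Dict.mk node) "id" "") []
      match d with
      | 0 => stackWalk tree rest (branch ++ [node])
      | d'+1 => stackWalk tree (children.map (fun c => (d', c)) ++ rest) (branch ++ [node])
  termination_by stack _ => (stack.map (fun p => (maxChild tree + 1) ^ (p.1 + 1))).sum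
  decreasing_by
  · simp only [List.map_cons, List.sum_cons]
    have : (0:Nat) < (maxChild tree + 1) ^ (0 + 1) := by positivity
    omega
  · simp only [List.map_append, List.sum_append, List.map_cons, List.sum_cons, List.map_map,
      Function.comp_def, List.map_const', List.sum_replicate, smul_eq_mul, Nat.succ_eq_add_one]
    have hlen := len_getD_le tree ("t1_" ++ PySem.Dict.getD (PySem.Dict.mk node) "id" "")
    have hpos : (0:Nat) < (maxChild tree + 1) ^ (d' + 1) := by positivity
    have hpow : (maxChild tree + 1) ^ (d' + 1 + 1)
        = (maxChild tree + 1) ^ (d' + 1) * (maxChild tree + 1) := pow_succ _ _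
    nlinarith [hlen, hpos, hpow]

-- greedy packing of the pre-collected branches (second pass of B)
def packBranches (branches : List (List (List (String × String)))) (max_chunk_size : Int) :
    List (List (List (String × String))) :=
  let st := branches.foldl
    (fun (p : List (List (List (String × String))) × List (List (String × String))) branch =>
      let p := if p.2 ≠ [] ∧ ((p.2.length : Int) + (branch.length : Int) > max_chunk_size)
               then (p.1 ++ [p.2], []) else p
      (p.1, p.2 ++ branch)) ([], [])
  if st.2 ≠ [] then st.1 ++ [st.2] else st.1

def chunk_branches_alt (tree : List (String × List (List (String × String)))) (max_chunk_size : Int) :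
    List (List (List (String × String))) :=
  let branches := (PySem.Dict.getD (PySem.Dict.mk tree) "__roots__" []).map
    (fun root => stackWalk tree [(tree.length + 1, root)] [])
  packBranches branches max_chunk_size

-- ===== PRECONDITION & SPEC =====
-- successor keys of a key in the child graph
def succKeys (tree : List (String × List (List (String × String)))) (k : String) : List String :=
  (PySem.Dict.getD (PySem.Dict.mk tree) k []).map
    (fun c => "t1_" ++ PySem.Dict.getD (PySem.Dict.mk c) "id" "")

-- n growth rounds of the reachable-key set
def growN (tree : List (String × List (List (String × String)))) : Nat → List String → List String
  | 0, s => s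
  | n+1, s => growN tree n (s.foldl (fun acc k => (succKeys tree k).foldl PySem.Set.add acc) s)

-- Pre_ excludes exactly the inputs on which A raises (RecursionError): trees whose child graph
-- has a cycle reachable from the roots, where _walk_branch recurses forever.
def Pre_chunk_branches (tree : List (String × List (List (String × String)))) (max_chunk_size : Int) : Prop :=
  ((growN tree (tree.length + 1)
      (PySem.Set.ofList ((PySem.Dict.getD (PySem.Dict.mk tree) "__roots__" []).map
        (fun c => "t1_" ++ PySem.Dict.getD (PySem.Dict.mk c) "id" "")))).all
    (fun k => !((growN tree (tree.length + 1) (PySem.Set.ofList (succKeys tree k))).contains k))) = true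

instance (tree : List (String × List (List (String × String)))) (max_chunk_size : Int) : Decidable (Pre_chunk_branches tree max_chunk_size) := by unfold Pre_chunk_branches; infer_instance

def pvWitness_chunk_branches : (List (String × List (List (String × String)))) × Int :=
  ([("__roots__", [[("id", "a")]]), ("t1_a", [[("id", "b")]])], 3)

def Spec_chunk_branches (tree : List (String × List (List (String × String)))) (max_chunk_size : Int) (out : List (List (List (String × String)))) : Prop := out = chunk_branches_alt tree max_chunk_size
instance (tree : List (String × List (List (String × String)))) (max_chunk_size : Int) (out : List (List (List (String × String)))) : Decidable (Spec_chunk_branches tree max_chunk_size out) := by unfold Spec_chunk_branches; infer_instance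

-- ===== CLAIM (what is proved, stated in full; the proofs are below) =====
def Claim_equal_chunk_branches : Prop := ∀ (tree : List (String × List (List (String × String)))) (max_chunk_size : Int), Dom_chunk_branches tree max_chunk_size → Pre_chunk_branches tree max_chunk_size → Spec_chunk_branches tree max_chunk_size (chunk_branches tree max_chunk_size)

-- ===== LEMMAS AND PROOFS =====

theorem walkBranch_succ (tree : List (String × List (List (String × String))))
    (fuel : Nat) (c : List (String × String)) :
    walkBranch tree (fuel + 1) c
      = [c] ++ (PySem.Dict.getD (PySem.Dict.mk tree)
          ("t1_" ++ PySem.Dict.getD (PySem.Dict.mk c) "id" "") []).flatMap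
            (walkBranch tree fuel) := by
  rw [walkBranch]
  exact PySem.List.foldl_append_eq_flatMap _ _ _

-- the iterative stack walk computes the concatenation of recursive walks of the stack items
theorem stackWalk_eq (tree : List (String × List (List (String × String))))
    (stack : List (Nat × List (String × String))) (branch : List (List (String × String))) :
    stackWalk tree stack branch = branch ++ stack.flatMap (fun p => walkBranch tree p.1 p.2) := by
  fun_induction stackWalk tree stack branch
  case case1 => simp
  case case2 =>
      rename_i ih
      rw [ih]
      simp [walkBranch, List.append_assoc]
  case case3 =>
      rename_i children d' ih
      rw [ih]
      simp only [List.flatMap_append, List.flatMap_cons, List.flatMap_map,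
        Nat.succ_eq_add_one, walkBranch_succ]
      simp [children, List.append_assoc]

theorem stackWalk_single (tree : List (String × List (List (String × String))))
    (root : List (String × String)) :
    stackWalk tree [(tree.length + 1, root)] [] = walkBranch tree (tree.length + 1) root := by
  rw [stackWalk_eq]; simp

-- ===== VERDICT (by name: the statement is the Claim_ definition above) =====
theorem chunk_branches_spec : Claim_equal_chunk_branches := by
  intro tree max_chunk_size _ _
  unfold Spec_chunk_branches
  simp only [chunk_branches, chunk_branches_alt, packBranches, List.foldl_map, stackWalk_single]
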